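-- pv_equiv track=rewrite | github.com/aviadkim/findoc-analyzer | backv2-github/DevDocs/backend/enhanced_processing/advanced_image_processor.py | _get_representative_line
-- ===== SOURCE A (Python) =====
-- from typing import List, Dict, Any, Tuple, Optional
--
-- def _get_representative_line(lines: List[Tuple[int, int, int, int]]) -> Tuple[int, int, int, int]:
--     """
--     Get a representative line from a group of lines.
--
--     Args:
--         lines: Group of lines
--
--     Returns:
--         Representative line
--     """
--     if not lines:
--         return (0, 0, 0, 0)
--
--     # Calculate average coordinates
--     x1_avg = sum(line[0] for line in lines) // len(lines)
--     y1_avg = sum(line[1] for line in lines) // len(lines)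
--     x2_avg = sum(line[2] for line in lines) // len(lines)
--     y2_avg = sum(line[3] for line in lines) // len(lines)
--
--     return (x1_avg, y1_avg, x2_avg, y2_avg)
-- ===== SOURCE B (Python) =====
-- def _seg_sum(seg):
--     # componentwise sums of a nonempty segment, by divide and conquer
--     if len(seg) == 1:
--         return seg[0]
--     mid = len(seg) // 2
--     a = _seg_sum(seg[:mid])
--     b = _seg_sum(seg[mid:])
--     return (a[0] + b[0], a[1] + b[1], a[2] + b[2], a[3] + b[3])
--
-- def _get_representative_line(lines):
--     if not lines:
--         return (0, 0, 0, 0)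
--     n = len(lines)
--     s = _seg_sum(lines)
--     return (s[0] // n, s[1] // n, s[2] // n, s[3] // n)
-- ===== Notes on version B (the rewrite author's own statement) =====
-- stated objective: alternative
-- what changed: Replaces A's four linear generator-sum scans with a recursive divide-and-conquer (balanced-tree) summation that splits the list in half and combines componentwise partial sums, dividing once at the end.
import Mathlib
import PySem

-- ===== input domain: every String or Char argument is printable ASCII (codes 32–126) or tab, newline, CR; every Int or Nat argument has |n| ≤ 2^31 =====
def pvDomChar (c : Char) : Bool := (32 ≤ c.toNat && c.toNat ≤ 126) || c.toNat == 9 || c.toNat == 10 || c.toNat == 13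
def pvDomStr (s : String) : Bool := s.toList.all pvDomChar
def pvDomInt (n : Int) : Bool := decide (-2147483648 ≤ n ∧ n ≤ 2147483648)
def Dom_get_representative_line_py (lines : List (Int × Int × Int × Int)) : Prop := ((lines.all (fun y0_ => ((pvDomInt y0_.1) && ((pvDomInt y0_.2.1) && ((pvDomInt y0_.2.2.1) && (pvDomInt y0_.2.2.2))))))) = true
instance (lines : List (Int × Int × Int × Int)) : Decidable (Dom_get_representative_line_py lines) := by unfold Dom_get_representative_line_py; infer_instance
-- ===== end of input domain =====

-- B replaces A's four linear generator-sum scans with a divide-and-conquer (balanced-tree)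
-- summation that splits the list in half and combines componentwise partial sums (alternative, same cost).

-- ===== PORT A =====
-- A: four separate sums over the list, each floor-divided by the length.
def get_representative_line_py (lines : List (Int × Int × Int × Int)) : Int × Int × Int × Int :=
  if lines = [] then (0, 0, 0, 0)
  else
    let n : Int := (lines.length : Int)
    let x1_avg := PySem.Int.floordiv ((lines.map (fun line => line.1)).sum) n
    let y1_avg := PySem.Int.floordiv ((lines.map (fun line => line.2.1)).sum) n
    let x2_avg := PySem.Int.floordiv ((lines.map (fun line => line.2.2.1)).sum) n
    let y2_avg := PySem.Int.floordiv ((lines.map (fun line => line.2.2.2)).sum) n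
    (x1_avg, y1_avg, x2_avg, y2_avg)

-- ===== PORT B =====
-- B's helper _seg_sum: divide-and-conquer componentwise sums of a nonempty segment.
-- (B never calls it on []; the `length ≤ 1` guard with headD is only there to make the
-- Lean function total — on length-1 segments it is exactly Python's `return seg[0]`.)
def segSumB (seg : List (Int × Int × Int × Int)) : Int × Int × Int × Int :=
  if _h : seg.length ≤ 1 then seg.headD (0, 0, 0, 0)
  else
    let mid := seg.length / 2
    let a := segSumB (seg.take mid)
    let b := segSumB (seg.drop mid)
    (a.1 + b.1, a.2.1 + b.2.1, a.2.2.1 + b.2.2.1, a.2.2.2 + b.2.2.2)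
termination_by seg.length
decreasing_by
  · simp only [List.length_take]; omega
  · simp only [List.length_drop]; omega

def get_representative_line_py_alt (lines : List (Int × Int × Int × Int)) : Int × Int × Int × Int :=
  if lines = [] then (0, 0, 0, 0)
  else
    let n : Int := (lines.length : Int)
    let s := segSumB lines
    (PySem.Int.floordiv s.1 n, PySem.Int.floordiv s.2.1 n,
     PySem.Int.floordiv s.2.2.1 n, PySem.Int.floordiv s.2.2.2 n)

-- ===== PRECONDITION & SPEC =====
def Spec_get_representative_line_py (lines : List (Int × Int × Int × Int)) (out : Int × Int × Int × Int) : Prop := out = get_representative_line_py_alt lines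
instance (lines : List (Int × Int × Int × Int)) (out : Int × Int × Int × Int) : Decidable (Spec_get_representative_line_py lines out) := by unfold Spec_get_representative_line_py; infer_instance

-- ===== CLAIM (what is proved, stated in full; the proofs are below) =====
def Claim_equal_get_representative_line_py : Prop := ∀ (lines : List (Int × Int × Int × Int)), Dom_get_representative_line_py lines → Spec_get_representative_line_py lines (get_representative_line_py lines)

-- ===== LEMMAS AND PROOFS =====

-- the tree summation computes the four componentwise sums (trivially true on [] as well)
theorem segSumB_eq (seg : List (Int × Int × Int × Int)) :
    segSumB seg
    = ((seg.map (fun line => line.1)).sum,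
       (seg.map (fun line => line.2.1)).sum,
       (seg.map (fun line => line.2.2.1)).sum,
       (seg.map (fun line => line.2.2.2)).sum) := by
  induction seg using segSumB.induct with
  | case1 seg h =>
    rw [segSumB]
    simp only [h, dite_true]
    match seg, h with
    | [], _ => simp
    | [l], _ => simp
  | case2 seg h mid iha ihb =>
    rw [segSumB]
    simp only [h, dite_false]
    show (_, _, _, _) = _
    rw [iha, ihb]
    have := List.take_append_drop mid seg
    conv_rhs => rw [← this]
    simp

-- ===== VERDICT (by name: the statement is the Claim_ definition above) =====
theorem get_representative_line_py_spec : Claim_equal_get_representative_line_py := by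
  intro lines _
  unfold Spec_get_representative_line_py get_representative_line_py get_representative_line_py_alt
  by_cases h : lines = []
  · simp [h]
  · simp [h, segSumB_eq]
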